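-- pv_equiv track=rewrite | github.com/tinyPlantBlobb/AdventofCode | AoC2023/day14.py | getsquarerocks
-- ===== SOURCE A (Python) =====
-- def getsquarerocks(board):
--     # defined as the x value as the key and the y value as the value in the dict
--     rocks = {}
--     newval = []
--     for y in range(len(board)):
--         for x in range(len(board[y])):
--             if board[y][x]== "#":
--                 newval = rocks.get(x, [])
--                 newval.append(y)
--                 rocks.update({x:newval})
--     return rocks
-- ===== SOURCE B (Python) =====
-- def getsquarerocks(board):
--     # distinct column indices that hold a '#', in order of first appearance (row-major)
--     cols = dict.fromkeys(x for row in board for x, c in enumerate(row) if c == "#")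
--     # per-column scan down the rows
--     return {x: [y for y, row in enumerate(board) if x < len(row) and row[x] == "#"]
--             for x in cols}
-- ===== Notes on version B (the rewrite author's own statement) =====
-- stated objective: alternative
-- what changed: A accumulates y-lists in a dict while scanning the board row-major; B first collects the distinct '#'-column indices (dict.fromkeys, first-occurrence order) and then builds each entry by a separate per-column scan down the rows (transpose-style), so no dict is incrementally updated.
import Mathlib
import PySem

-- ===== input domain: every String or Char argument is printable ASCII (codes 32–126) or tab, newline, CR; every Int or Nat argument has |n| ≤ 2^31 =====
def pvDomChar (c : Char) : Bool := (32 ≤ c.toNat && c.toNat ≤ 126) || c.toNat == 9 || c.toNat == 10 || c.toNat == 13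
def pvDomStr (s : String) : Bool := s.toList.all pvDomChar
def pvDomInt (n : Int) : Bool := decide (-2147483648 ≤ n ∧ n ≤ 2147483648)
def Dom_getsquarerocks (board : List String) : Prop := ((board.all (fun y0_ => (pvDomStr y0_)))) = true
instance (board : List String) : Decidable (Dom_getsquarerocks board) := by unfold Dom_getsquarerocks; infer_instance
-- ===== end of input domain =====

-- B replaces A's row-major dict accumulation by a transpose-style pass: collect the distinct '#'-columns
-- (first-occurrence order), then scan each column down the rows (objective: alternative, same cost).


-- ===== PORT A =====
-- 'board[y]' / 'row[x]' with indices from range(len(..)) are always in range: ported with the total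
-- pyGetD form (exact there).  'rocks.get(x, []).append(y); rocks.update({x: newval})' is
-- insert x (getD x [] ++ [y]) under value semantics.
def getsquarerocks (board : List String) : List (Int × List Int) :=
  ((PySem.List.pyRange 0 (PySem.List.len board) 1).foldl (fun rocks y =>
      let row := (PySem.List.pyGetD board y "").toList
      (PySem.List.pyRange 0 (PySem.List.len row) 1).foldl (fun rocks x =>
        if PySem.List.pyGetD row x ' ' = '#' then
          rocks.insert x (rocks.getD x [] ++ [y])
        else rocks) rocks)
    (PySem.Dict.empty)).items

-- ===== PORT B =====
def getsquarerocks_alt (board : List String) : List (Int × List Int) :=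
  let cols : List Int := PySem.List.dedup
    (board.flatMap (fun row =>
      (PySem.List.enumerate row.toList).filterMap (fun p =>
        if p.2 = '#' then some p.1 else none)))
  cols.map (fun x =>
    (x, (PySem.List.enumerate board).filterMap (fun q =>
      if x < PySem.Str.len q.2 ∧ PySem.Str.pyGet? q.2 x = some '#' then some q.1 else none)))

-- ===== PRECONDITION & SPEC =====
def Spec_getsquarerocks (board : List String) (out : List (Int × List Int)) : Prop := out = getsquarerocks_alt board
instance (board : List String) (out : List (Int × List Int)) : Decidable (Spec_getsquarerocks board out) := by unfold Spec_getsquarerocks; infer_instance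

-- ===== CLAIM (what is proved, stated in full; the proofs are below) =====
def Claim_equal_getsquarerocks : Prop := ∀ (board : List String), Dom_getsquarerocks board → Spec_getsquarerocks board (getsquarerocks board)

-- ===== LEMMAS AND PROOFS =====

-- the '#'-positions of one row, as (column, row) pairs
def pvRow (y : Int) (cs : List Char) : List (Int × Int) :=
  (PySem.List.enumerate cs).filterMap (fun p => if p.2 = '#' then some (p.1, y) else none)

-- all '#'-positions of the board, row-major
def pvP (board : List String) : List (Int × Int) :=
  (PySem.List.enumerate board).flatMap (fun q => pvRow q.1 q.2.toList)

-- folding the grouping step over one row's filtered positions is the row's char loop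
theorem pvRow_fold_aux (y : Int) (l : List (Int × Char)) (d : PySem.Dict Int (List Int)) :
    ((l.filterMap (fun p => if p.2 = '#' then some (p.1, y) else none)).foldl
        (fun d p => d.modify p.1 [] (· ++ [p.2])) d)
      = l.foldl (fun d p => if p.2 = '#' then d.modify p.1 [] (· ++ [y]) else d) d := by
  induction l generalizing d with
  | nil => rfl
  | cons p t ih =>
    by_cases h : p.2 = '#' <;> simp [h, ih]

-- one row of A's loop is the grouping fold over that row's '#'-positions
theorem pvRow_fold (y : Int) (cs : List Char) (d : PySem.Dict Int (List Int)) :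
    (PySem.List.pyRange 0 (PySem.List.len cs) 1).foldl (fun d x =>
        if PySem.List.pyGetD cs x ' ' = '#' then d.modify x [] (· ++ [y]) else d) d
      = (pvRow y cs).foldl (fun d p => d.modify p.1 [] (· ++ [p.2])) d := by
  unfold pvRow
  rw [pvRow_fold_aux, PySem.List.enumerate_eq_map_pyRange cs ' ', List.foldl_map]

-- A's dict is the grouping fold over the flat position list
theorem pvA_eq_fold (board : List String) :
    getsquarerocks board =
      ((pvP board).foldl (fun d p => d.modify p.1 [] (· ++ [p.2])) PySem.Dict.empty).items := by
  refine congrArg PySem.Dict.items ?_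
  unfold pvP
  rw [List.foldl_flatMap]
  rw [PySem.List.enumerate_eq_map_pyRange board "", List.foldl_map]
  refine PySem.List.foldl_congr_mem _ _ _ _ (fun d y _ => ?_)
  exact pvRow_fold y (PySem.List.pyGetD board y "").toList d

-- per-row column scan (generalized over the enumerate start)
theorem pvRow_filter (cs : List Char) (s x y : Int) :
    (((PySem.List.enumerate cs s).filterMap (fun p => if p.2 = '#' then some (p.1, y) else none)).filter
        (fun p => p.1 == x)).map (·.2)
      = if s ≤ x ∧ x < s + cs.length ∧ cs[(x - s).toNat]? = some '#' then [y] else [] := by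
  induction cs generalizing s with
  | nil =>
    simp only [PySem.List.enumerate_nil, List.filterMap_nil, List.filter_nil, List.map_nil,
      List.length_nil]
    rw [if_neg]; rintro ⟨h1, h2, _⟩; omega
  | cons c t ih =>
    have hgt : ∀ a : Int, (a, '#') ∈ PySem.List.enumerate t (s + 1) → ¬a = s := by
      intro a ha
      rw [PySem.List.mem_enumerate_iff] at ha
      obtain ⟨k, hk, heq⟩ := ha
      have : a = s + 1 + k := by simpa using congrArg Prod.fst heq
      omega
    have key : ∀ c' : Char, x ≠ s →
        (if s + 1 ≤ x ∧ x < s + 1 + (t.length : Int) ∧ t[(x - (s + 1)).toNat]? = some '#'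
          then ([y] : List Int) else [])
        = if s ≤ x ∧ x < s + ((t.length : Int) + 1) ∧ (c' :: t)[(x - s).toNat]? = some '#'
          then [y] else [] := by
      intro c' hxs
      by_cases hlt : s + 1 ≤ x
      · have hk : (x - s).toNat = (x - (s + 1)).toNat + 1 := by omega
        rw [hk, List.getElem?_cons_succ]
        refine if_congr ⟨fun ⟨h1, h2, h3⟩ => ⟨by omega, by omega, h3⟩,
          fun ⟨h1, h2, h3⟩ => ⟨by omega, by omega, h3⟩⟩ rfl rfl
      · rw [if_neg (by rintro ⟨h1, _, _⟩; omega), if_neg (by rintro ⟨h1, _, _⟩; omega)]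
    simp only [PySem.List.enumerate_cons, List.filterMap_cons]
    by_cases hc : c = '#'
    · subst hc
      by_cases hxs : x = s
      · simp [hxs]
        exact hgt
      · simp [ih, Ne.symm hxs]
        have := key '#' hxs
        simp only [show s + 1 ≤ x ↔ s < x from by omega] at this
        exact this
    · by_cases hxs : x = s
      · simp [hc, hxs]
        exact hgt
      · simp [hc, ih]
        have := key c hxs
        simp only [show s + 1 ≤ x ↔ s < x from by omega] at this
        exact this

-- every collected column index is nonnegative
theorem pvP_fst_nonneg (board : List String) {x : Int}
    (hx : x ∈ (pvP board).map (·.1)) : 0 ≤ x := by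
  simp only [pvP, pvRow, List.mem_map, List.mem_flatMap, List.mem_filterMap] at hx
  obtain ⟨p, ⟨q, hq, hp⟩, rfl⟩ := hx
  obtain ⟨r, hr, hrp⟩ := hp
  rw [PySem.List.mem_enumerate_iff] at hr
  obtain ⟨k, hk, rfl⟩ := hr
  split at hrp
  · obtain rfl := Option.some.inj hrp
    simp
  · exact absurd hrp (by simp)

-- B's flat position-column list is the fst-projection of pvP
theorem pvCols_eq (board : List String) :
    board.flatMap (fun row =>
        (PySem.List.enumerate row.toList).filterMap (fun p =>
          if p.2 = '#' then some p.1 else none))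
      = (pvP board).map (·.1) := by
  unfold pvP
  rw [List.map_flatMap]
  conv_lhs => rw [← PySem.List.map_snd_enumerate board 0]
  rw [List.flatMap_map]
  refine List.flatMap_congr (fun q hq => ?_)
  simp only [pvRow, List.map_filterMap]
  refine List.filterMap_congr (fun p hp => ?_)
  by_cases h : p.2 = '#' <;> simp [h]

-- B's per-column scan equals the filtered position list
theorem pvCol_eq (board : List String) (x : Int) (hx : 0 ≤ x) :
    (PySem.List.enumerate board).filterMap (fun q =>
        if x < PySem.Str.len q.2 ∧ PySem.Str.pyGet? q.2 x = some '#' then some q.1 else none)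
      = (((pvP board).filter (fun p => p.1 == x)).map (·.2)) := by
  unfold pvP
  rw [List.filter_flatMap, List.map_flatMap]
  rw [List.filterMap_eq_flatMap_toList]
  refine List.flatMap_congr (fun q hq => ?_)
  unfold pvRow
  rw [pvRow_filter q.2.toList 0 x q.1]
  have hiff : (x < PySem.Str.len q.2 ∧ PySem.Str.pyGet? q.2 x = some '#') ↔
      (0 ≤ x ∧ x < 0 + (q.2.toList.length : Int) ∧ q.2.toList[(x - 0).toNat]? = some '#') := by
    simp [PySem.Str.len, PySem.Str.pyGet?, PySem.List.pyGet?_of_nonneg _ hx, hx]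
  by_cases h : x < PySem.Str.len q.2 ∧ PySem.Str.pyGet? q.2 x = some '#'
  · rw [if_pos h, if_pos (by simpa using hiff.mp h)]
    rfl
  · rw [if_neg h, if_neg (by intro hh; exact h (hiff.mpr (by simpa using hh)))]
    rfl

-- ===== VERDICT (by name: the statement is the Claim_ definition above) =====
theorem getsquarerocks_spec : Claim_equal_getsquarerocks := by
  intro board _
  unfold Spec_getsquarerocks getsquarerocks_alt
  rw [pvA_eq_fold, pvCols_eq]
  have hnd : ((pvP board).foldl (fun d p => d.modify p.1 [] (· ++ [p.2]))
      (PySem.Dict.empty : PySem.Dict Int (List Int))).keys.Nodup :=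
    PySem.Dict.nodup_keys_foldl_modify_key (pvP board) Prod.fst [] (fun _ p => (· ++ [p.2]))
      PySem.Dict.empty (by simp)
  rw [PySem.Dict.items_eq_map_keys _ hnd []]
  have hkeys : ((pvP board).foldl (fun d p => d.modify p.1 [] (· ++ [p.2]))
      (PySem.Dict.empty : PySem.Dict Int (List Int))).keys
      = PySem.List.dedup ((pvP board).map (·.1)) := by
    rw [PySem.Dict.keys_foldl_modify_key (pvP board) Prod.fst [] (fun _ p => (· ++ [p.2]))]
    simp [PySem.Dict.keys_empty, PySem.Set.update_nil_left, PySem.List.dedup]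
  rw [hkeys]
  refine List.map_congr_left (fun x hx => ?_)
  have hx0 : 0 ≤ x := by
    refine pvP_fst_nonneg board ?_
    have : x ∈ (pvP board).map (·.1) := by
      have := (PySem.Set.mem_ofList (xs := (pvP board).map (·.1)) (y := x)).mp
      exact this (by simpa [PySem.List.dedup] using hx)
    exact this
  rw [pvCol_eq board x hx0]
  refine congrArg (fun l => (x, l)) ?_
  rw [PySem.Dict.getD_foldl_modify_append]
  simp [PySem.Dict.getD_empty]
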